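-- pv_equiv track=rewrite | github.com/yoonsm0320/python | PCCP 기출문제 2번  퍼즐 게임 챌린지.py | solution
-- ===== SOURCE A (Python) =====
-- def solution(diffs, times, limit):
--     max_level=max(diffs)
--     l=1
--     r=max_level
--     answer=max_level
--     while l<r:
--         level=int((l+r)//2)
--         time=times[0]
--         for i in range(1,len(diffs)):
--             k=0
--             if level<diffs[i]:
--                 k=diffs[i]-level
--             time +=(times[i]+times[i-1])*k+times[i]
--         if time<=limit:
--             r=level
--             answer=level
--         else:
--             l=level+1
--     return answer
-- ===== SOURCE B (Python) =====
-- def solution(diffs, times, limit):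
--     top = max(diffs)
--     if top <= 1:
--         return top
--     base = sum(times[:len(diffs)])
--     pairs = sorted(((diffs[i], times[i] + times[i - 1]) for i in range(1, len(diffs))),
--                    key=lambda p: p[0], reverse=True)
--
--     def cost(level):
--         t = base
--         for d, w in pairs:
--             if d <= level:
--                 break
--             t += w * (d - level)
--         return t
--
--     def go(lo, hi):
--         if lo >= hi:
--             return hi
--         mid = (lo + hi) // 2
--         if cost(mid) <= limit:
--             return go(lo, mid)
--         return go(mid + 1, hi)
--
--     return go(1, top)
-- ===== Notes on version B (the rewrite author's own statement) =====
-- stated objective: faster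
-- what changed: The per-query feasibility scan over all stages is replaced by a structure built once -- (difficulty, time-weight) pairs sorted in descending difficulty plus a precomputed base sum -- so each binary-search step only walks the still-penalized prefix and stops at the first stage at or below the candidate level; the answer-variable while-loop bisection becomes a pure recursive binary search returning hi, with a short-circuit when max(diffs) <= 1.
import Mathlib
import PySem

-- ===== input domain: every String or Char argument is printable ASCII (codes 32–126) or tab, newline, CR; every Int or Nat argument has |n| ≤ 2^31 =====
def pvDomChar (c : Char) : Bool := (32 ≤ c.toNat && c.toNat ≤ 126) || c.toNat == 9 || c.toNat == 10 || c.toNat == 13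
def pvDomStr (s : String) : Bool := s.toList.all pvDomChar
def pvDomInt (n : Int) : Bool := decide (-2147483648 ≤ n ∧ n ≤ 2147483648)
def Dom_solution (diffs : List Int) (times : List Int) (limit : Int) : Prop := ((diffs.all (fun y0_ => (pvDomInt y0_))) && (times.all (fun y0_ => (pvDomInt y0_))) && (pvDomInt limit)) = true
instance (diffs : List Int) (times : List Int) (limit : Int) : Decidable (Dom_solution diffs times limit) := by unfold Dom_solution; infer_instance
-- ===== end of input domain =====

-- B keeps A's binary search over levels but precomputes a descending-sorted penalty structure so each
-- feasibility check early-exits instead of rescanning every stage; the loop answer-variable disappears.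

-- ===== PORT A =====
-- the inner for-loop of A: time = times[0]; for i in range(1, len(diffs)): ...
def solutionCost (diffs : List Int) (times : List Int) (level : Int) : Int :=
  (PySem.List.pyRange 1 (diffs.length : Int) 1).foldl
    (fun time i =>
      let k : Int := if level < PySem.List.pyGetD diffs i 0 then PySem.List.pyGetD diffs i 0 - level else 0
      time + (PySem.List.pyGetD times i 0 + PySem.List.pyGetD times (i - 1) 0) * k + PySem.List.pyGetD times i 0)
    (PySem.List.pyGetD times 0 0)

-- the while l < r loop, fuel = r - l at the call site
def solutionLoop (diffs : List Int) (times : List Int) (limit : Int) : Nat → Int → Int → Int → Int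
  | 0, _, _, answer => answer
  | fuel + 1, l, r, answer =>
    if l < r then
      let level := PySem.Int.floordiv (l + r) 2
      let time := solutionCost diffs times level
      if time ≤ limit then solutionLoop diffs times limit fuel l level level
      else solutionLoop diffs times limit fuel (level + 1) r answer
    else answer

def solution (diffs : List Int) (times : List Int) (limit : Int) : Int :=
  let maxLevel := (PySem.List.max? diffs (fun x => x)).getD 0
  solutionLoop diffs times limit (maxLevel - 1).toNat 1 maxLevel maxLevel

-- ===== PORT B =====
-- pairs = sorted(((diffs[i], times[i]+times[i-1]) for i in range(1, len(diffs))), key=..., reverse=True)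
def altPairs (diffs : List Int) (times : List Int) : List (Int × Int) :=
  PySem.List.sorted
    ((PySem.List.pyRange 1 (diffs.length : Int) 1).map
      (fun i => (PySem.List.pyGetD diffs i 0,
                 PySem.List.pyGetD times i 0 + PySem.List.pyGetD times (i - 1) 0)))
    (fun p => p.1) true

-- cost(level): early-exit accumulation over the descending-sorted pairs
def altCost (level : Int) : List (Int × Int) → Int → Int
  | [], t => t
  | (d, w) :: rest, t => if d ≤ level then t else altCost level rest (t + w * (d - level))

-- go(lo, hi): pure recursive binary search, fuel = hi - lo at the call site
def altGo (pairs : List (Int × Int)) (base : Int) (limit : Int) : Nat → Int → Int → Int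
  | 0, _, hi => hi
  | fuel + 1, lo, hi =>
    if lo ≥ hi then hi
    else
      let mid := PySem.Int.floordiv (lo + hi) 2
      if altCost mid pairs base ≤ limit then altGo pairs base limit fuel lo mid
      else altGo pairs base limit fuel (mid + 1) hi

def solution_alt (diffs : List Int) (times : List Int) (limit : Int) : Int :=
  let top := (PySem.List.max? diffs (fun x => x)).getD 0
  if top ≤ 1 then top
  else
    let base := (PySem.List.slice times none (some (diffs.length : Int))).sum
    altGo (altPairs diffs times) base limit (top - 1).toNat 1 top

-- ===== PRECONDITION & SPEC =====
-- Pre_ excludes exactly the inputs on which A raises: max([]) is a ValueError, and whenever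
-- max(diffs) > 1 the loop body indexes times[0..len(diffs)-1], an IndexError if times is too short.
def Pre_solution (diffs : List Int) (times : List Int) (limit : Int) : Prop :=
  diffs ≠ [] ∧ ((PySem.List.max? diffs (fun x => x)).getD 0 ≤ 1 ∨ diffs.length ≤ times.length)
instance (diffs : List Int) (times : List Int) (limit : Int) : Decidable (Pre_solution diffs times limit) := by
  unfold Pre_solution; infer_instance

def pvWitness_solution : List Int × List Int × Int := ([2, 3, 5], [1, 2, 3], 100)

def Spec_solution (diffs : List Int) (times : List Int) (limit : Int) (out : Int) : Prop := out = solution_alt diffs times limit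
instance (diffs : List Int) (times : List Int) (limit : Int) (out : Int) : Decidable (Spec_solution diffs times limit out) := by unfold Spec_solution; infer_instance

-- ===== CLAIM (what is proved, stated in full; the proofs are below) =====
def Claim_equal_solution : Prop := ∀ (diffs : List Int) (times : List Int) (limit : Int), Dom_solution diffs times limit → Pre_solution diffs times limit → Spec_solution diffs times limit (solution diffs times limit)

-- ===== LEMMAS AND PROOFS =====

-- the penalty one stage contributes to the feasibility cost at a given level
def pvPenalty (level : Int) (p : Int × Int) : Int :=
  if p.1 ≤ level then 0 else p.2 * (p.1 - level)

theorem pv_foldl_add (l : List Int) (f g : Int → Int) (init : Int) :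
    l.foldl (fun a i => a + f i + g i) init = init + (l.map (fun i => f i + g i)).sum := by
  induction l generalizing init with
  | nil => simp
  | cons x xs ih => simp [List.foldl_cons, ih]; ring

theorem pv_altCost_eq (level : Int) (lst : List (Int × Int))
    (hs : lst.Pairwise (fun a b => b.1 ≤ a.1)) (t : Int) :
    altCost level lst t = t + (lst.map (pvPenalty level)).sum := by
  induction lst generalizing t with
  | nil => simp [altCost]
  | cons p rest ih =>
    obtain ⟨d, w⟩ := p
    rcases List.pairwise_cons.mp hs with ⟨hhd, htl⟩
    by_cases h : d ≤ level
    · have hz : ∀ q ∈ rest, pvPenalty level q = 0 := by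
        intro q hq
        have : q.1 ≤ d := hhd q hq
        simp [pvPenalty, le_trans this h]
      simp [altCost, h, pvPenalty, List.sum_eq_zero (by
        intro x hx
        rcases List.mem_map.mp hx with ⟨q, hq, rfl⟩
        exact hz q hq)]
    · simp only [altCost, if_neg h, ih htl]
      simp [pvPenalty, h]
      ring

theorem pv_sum_head_tail (l : List Int) (h : l ≠ []) :
    l.sum = l.headD 0 + l.tail.sum := by
  cases l with
  | nil => exact absurd rfl h
  | cons x xs => simp

-- the cost functions of the two ports agree
theorem pv_cost_eq (diffs times : List Int) (level : Int)
    (hne : diffs ≠ []) (hlen : diffs.length ≤ times.length) :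
    solutionCost diffs times level
      = altCost level (altPairs diffs times) ((PySem.List.slice times none (some (diffs.length : Int))).sum) := by
  have hperm : (altPairs diffs times).Perm
      ((PySem.List.pyRange 1 (diffs.length : Int) 1).map
        (fun i => (PySem.List.pyGetD diffs i 0,
                   PySem.List.pyGetD times i 0 + PySem.List.pyGetD times (i - 1) 0))) :=
    PySem.List.sorted_perm _ _ _
  have hsorted : (altPairs diffs times).Pairwise (fun a b => b.1 ≤ a.1) :=
    PySem.List.sorted_pairwise_rev _ _
  rw [pv_altCost_eq level _ hsorted]
  have hmapperm := hperm.map (pvPenalty level)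
  rw [hmapperm.sum_eq]
  -- unfold A's fold into base + penalties
  rw [solutionCost,
      pv_foldl_add _
        (fun i => (PySem.List.pyGetD times i 0 + PySem.List.pyGetD times (i - 1) 0) *
          (if level < PySem.List.pyGetD diffs i 0 then PySem.List.pyGetD diffs i 0 - level else 0))
        (fun i => PySem.List.pyGetD times i 0)]
  rw [PySem.List.sum_map_add_int]
  -- penalty part
  have hpen : ((PySem.List.pyRange 1 (diffs.length : Int) 1).map
        (fun i => (PySem.List.pyGetD times i 0 + PySem.List.pyGetD times (i - 1) 0) *
          (if level < PySem.List.pyGetD diffs i 0 then PySem.List.pyGetD diffs i 0 - level else 0)))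
      = ((PySem.List.pyRange 1 (diffs.length : Int) 1).map
          (fun i => (PySem.List.pyGetD diffs i 0,
                     PySem.List.pyGetD times i 0 + PySem.List.pyGetD times (i - 1) 0))).map
          (pvPenalty level) := by
    rw [List.map_map]
    apply List.map_congr_left
    intro i _
    simp only [Function.comp, pvPenalty]
    by_cases h : level < PySem.List.pyGetD diffs i 0
    · rw [if_pos h, if_neg (by omega)]
    · rw [if_neg h, if_pos (by omega), mul_zero]
  -- base part: times[0] + sum(times[i] for i in range(1, n)) = sum(times[:n])
  have hbase : PySem.List.pyGetD times 0 0
        + ((PySem.List.pyRange 1 (diffs.length : Int) 1).map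
            (fun i => PySem.List.pyGetD times i 0)).sum
      = (PySem.List.slice times none (some (diffs.length : Int))).sum := by
    have hslice : PySem.List.slice times none (some (diffs.length : Int)) = times.take diffs.length :=
      PySem.List.slice_to_natCast times diffs.length
    have hlen' : (times.take diffs.length).length = diffs.length := by
      simp [Nat.min_eq_left hlen]
    have hmap : (PySem.List.pyRange 1 (diffs.length : Int) 1).map
          (fun i => PySem.List.pyGetD times i 0)
        = (PySem.List.pyRange 1 ((times.take diffs.length).length : Int) 1).map
            (fun i => PySem.List.pyGetD (times.take diffs.length) i 0) := by
      rw [hlen']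
      apply List.map_congr_left
      intro i hi
      rcases (PySem.List.mem_pyRange_one).mp hi with ⟨h1, h2⟩
      rw [PySem.List.pyGetD_eq_getElem times 0 (by omega) (by omega),
          PySem.List.pyGetD_eq_getElem (times.take diffs.length) 0 (by omega) (by rw [hlen']; omega)]
      exact (List.getElem_take).symm
    rw [hmap, PySem.List.map_pyGetD_pyRange' (times.take diffs.length) 0 (by omega)]
    have htake0 : PySem.List.pyGetD times 0 0 = (times.take diffs.length).headD 0 := by
      have hnil : times ≠ [] := by
        intro h; subst h; simp at hlen
        exact hne hlen
      cases times with
      | nil => exact absurd rfl hnil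
      | cons x xs =>
        have : diffs.length ≠ 0 := by
          intro h; exact hne (List.eq_nil_of_length_eq_zero h)
        cases hd : diffs.length with
        | zero => exact absurd hd this
        | succ m => simp [PySem.List.pyGetD_zero_cons]
    rw [hslice, htake0, Int.toNat_one, List.drop_one,
        ← pv_sum_head_tail _ (by
          intro h
          have := congrArg List.length h
          rw [hlen'] at this
          simp at this
          exact hne this)]
  rw [hpen] at *
  omega

-- the two fueled binary searches run in lockstep once the costs agree (A's answer variable always equals r)
theorem pv_loop_eq (diffs times : List Int) (limit base : Int) (pairs : List (Int × Int))
    (hcost : ∀ level, solutionCost diffs times level = altCost level pairs base) :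
    ∀ (fuel : Nat) (lo hi : Int),
      solutionLoop diffs times limit fuel lo hi hi = altGo pairs base limit fuel lo hi := by
  intro fuel
  induction fuel with
  | zero => intro lo hi; simp [solutionLoop, altGo]
  | succ n ih =>
    intro lo hi
    by_cases h : lo < hi
    · simp only [solutionLoop, altGo, if_pos h, if_neg (not_le.mpr h), hcost]
      by_cases hfeas : altCost (PySem.Int.floordiv (lo + hi) 2) pairs base ≤ limit
      · simp only [if_pos hfeas, ih]
      · simp only [if_neg hfeas, ih]
    · simp [solutionLoop, altGo, h, le_of_not_gt h]

-- ===== VERDICT (by name: the statement is the Claim_ definition above) =====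
theorem solution_spec : Claim_equal_solution := by
  intro diffs times limit _ hpre
  obtain ⟨hne, hcase⟩ := hpre
  unfold Spec_solution solution solution_alt
  by_cases htop : (PySem.List.max? diffs (fun x => x)).getD 0 ≤ 1
  · have : ((PySem.List.max? diffs (fun x => x)).getD 0 - 1).toNat = 0 :=
      Int.toNat_of_nonpos (by omega)
    simp only [this, solutionLoop, if_pos htop]
  · have hlen : diffs.length ≤ times.length := by
      rcases hcase with h | h
      · exact absurd h htop
      · exact h
    simp only [if_neg htop]
    exact pv_loop_eq diffs times limit _ (altPairs diffs times)
      (fun level => pv_cost_eq diffs times level hne hlen) _ 1 _
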